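-- pv_equiv track=rewrite | github.com/shlee0916/LeetCode_Solutions | Medium/node_with_highest_edge_score.py | edgeScore
-- ===== SOURCE A (Python) =====
-- from typing import List
--
-- def edgeScore(edges: List[int]) -> int:
--     scores = [0] * len(edges)
--
--     for idx, edge in enumerate(edges):
--         scores[edge] += idx
--
--     max_score = max(scores)
--     for idx, score in enumerate(scores):
--         if score == max_score:
--             return idx
-- ===== SOURCE B (Python) =====
-- def edgeScore(edges):
--     scores = [0] * len(edges)
--     for idx, edge in enumerate(edges):
--         scores[edge] += idx
--     # stable sort of the positions by descending score: among equal scores the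
--     # smaller position comes first, so the head is the first position with the
--     # maximum score
--     order = sorted(range(len(edges)), key=lambda i: -scores[i])
--     return order[0]
-- ===== Notes on version B (the rewrite author's own statement) =====
-- stated objective: alternative
-- what changed: After accumulating the scores list, B sorts the positions by descending score with Python's stable sort and returns the head of that order, instead of A's max() pass followed by a linear rescan for the first position holding the maximum; stability makes the head exactly A's first argmax.
-- outside the precondition, e.g. on edgeScore([]): A raises ValueError, B raises IndexError
import Mathlib
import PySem

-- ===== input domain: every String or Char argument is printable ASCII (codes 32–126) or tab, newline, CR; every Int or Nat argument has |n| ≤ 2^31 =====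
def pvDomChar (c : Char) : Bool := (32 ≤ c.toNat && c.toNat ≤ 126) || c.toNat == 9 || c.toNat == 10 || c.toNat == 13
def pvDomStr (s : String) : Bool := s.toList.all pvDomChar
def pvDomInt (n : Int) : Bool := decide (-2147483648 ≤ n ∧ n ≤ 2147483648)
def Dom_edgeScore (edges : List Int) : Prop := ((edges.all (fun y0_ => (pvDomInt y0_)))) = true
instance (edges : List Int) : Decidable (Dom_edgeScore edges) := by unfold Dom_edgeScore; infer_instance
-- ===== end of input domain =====

-- B replaces A's max() pass and first-index rescan by a stable sort of the positions by
-- descending score whose head is taken; equality is proved on all inputs where A returns.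

-- ===== PORT A =====
-- Python's final loop: first idx with score == max_score (falls off the end only if no
-- match, impossible since max_score ∈ scores; 0 is a junk default for that dead branch).
def edgeScoreFindA : List (Int × Int) → Int → Int
  | [], _ => 0
  | (idx, score) :: rest, m => if score = m then idx else edgeScoreFindA rest m

def edgeScore (edges : List Int) : Int :=
  let scores := (PySem.List.enumerate edges 0).foldl
      (fun sc p => PySem.List.pySetD sc p.2 (PySem.List.pyGetD sc p.2 0 + p.1))
      (List.replicate edges.length 0)
  match PySem.List.max? scores (fun y => y) with
  | none => 0   -- max([]) raises ValueError; excluded by Pre_edgeScore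
  | some m => edgeScoreFindA (PySem.List.enumerate scores 0) m

-- ===== PORT B =====
-- Source B: same accumulation loop, then sorted(range(n), key=lambda i: -scores[i])[0]
def edgeScore_alt (edges : List Int) : Int :=
  let scores := (PySem.List.enumerate edges 0).foldl
      (fun sc p => PySem.List.pySetD sc p.2 (PySem.List.pyGetD sc p.2 0 + p.1))
      (List.replicate edges.length 0)
  let order := PySem.List.sorted (PySem.List.pyRange 0 (edges.length : Int))
      (fun i => -(PySem.List.pyGetD scores i 0))
  match PySem.List.pyGet? order 0 with
  | none => 0   -- indexing the empty order raises IndexError; excluded by Pre_edgeScore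
  | some x => x

-- ===== PRECONDITION & SPEC =====
-- Pre_ excludes exactly the inputs on which A raises: the empty list (A's max of an
-- empty sequence raises ValueError; B's head of the empty order raises IndexError) and
-- lists with an entry below -len or at least len, where the score update raises
-- IndexError in both. Everything else, negative in-range entries included, is inside.
def Pre_edgeScore (edges : List Int) : Prop :=
  edges ≠ [] ∧ ∀ e ∈ edges, -(edges.length : Int) ≤ e ∧ e < (edges.length : Int)
instance (edges : List Int) : Decidable (Pre_edgeScore edges) := by
  unfold Pre_edgeScore; infer_instance

def pvWitness_edgeScore : List Int := [1, 0, 0, -1]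

def Spec_edgeScore (edges : List Int) (out : Int) : Prop := out = edgeScore_alt edges
instance (edges : List Int) (out : Int) : Decidable (Spec_edgeScore edges out) := by
  unfold Spec_edgeScore; infer_instance

-- ===== CLAIM (what is proved, stated in full; the proofs are below) =====
def Claim_equal_edgeScore : Prop :=
  ∀ (edges : List Int), Dom_edgeScore edges → Pre_edgeScore edges →
    Spec_edgeScore edges (edgeScore edges)

-- ===== LEMMAS AND PROOFS =====

-- A's accumulation step, named so both ports' folds can be compared
def pvStepA (sc : List Int) (p : Int × Int) : List Int :=
  PySem.List.pySetD sc p.2 (PySem.List.pyGetD sc p.2 0 + p.1)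

-- the accumulation loop preserves the length of the scores list
theorem pv_len_fold (ps : List (Int × Int)) :
    ∀ (init : List Int), (ps.foldl pvStepA init).length = init.length := by
  induction ps with
  | nil => intro init; rfl
  | cons p ps ih =>
    intro init
    simp only [List.foldl_cons, ih, pvStepA, PySem.List.length_pySetD]

-- A's search loop returns k + (first index of m) when m occurs in s
theorem pv_findA_spec (s : List Int) :
    ∀ (k m : Int), m ∈ s →
      edgeScoreFindA (PySem.List.enumerate s k) m = k + (s.findIdx (· == m) : Nat) := by
  induction s with
  | nil => intro k m h; simp at h
  | cons c s ih =>
    intro k m hm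
    rw [PySem.List.enumerate_cons]
    by_cases hc : c = m
    · simp [edgeScoreFindA, hc, List.findIdx_cons]
    · have hm' : m ∈ s := by
        rcases List.mem_cons.mp hm with h | h
        · exact absurd h.symm hc
        · exact h
      simp only [edgeScoreFindA, if_neg hc, ih (k + 1) m hm', List.findIdx_cons]
      have : (c == m) = false := by simp [hc]
      rw [this]
      simp only [cond_false]
      push_cast
      ring

-- the head of an insertion-sort fold is the strict-minimum fold of the keys: insertBy
-- puts x in front exactly when its key strictly beats the current head's, so the head
-- tracks the FIRST element of minimal key (this is the stability of Python's sort)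
theorem pv_foldl_insertBy_head (g : Int → Int) (l : List Int) :
    ∀ (h : Int) (t : List Int), ∃ t' : List Int,
      l.foldl (fun acc x => PySem.List.insertBy (fun a b => decide (g a < g b)) x acc) (h :: t)
        = (l.foldl (fun best x => if g x < g best then x else best) h) :: t' := by
  induction l with
  | nil => intro h t; exact ⟨t, rfl⟩
  | cons x l ih =>
    intro h t
    simp only [List.foldl_cons]
    by_cases hc : g x < g h
    · rw [show PySem.List.insertBy (fun a b => decide (g a < g b)) x (h :: t)
          = x :: h :: t by simp [PySem.List.insertBy, hc], if_pos hc]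
      exact ih x (h :: t)
    · rw [show PySem.List.insertBy (fun a b => decide (g a < g b)) x (h :: t)
          = h :: PySem.List.insertBy (fun a b => decide (g a < g b)) x t by
            simp [PySem.List.insertBy, hc], if_neg hc]
      exact ih h _

-- the strict-minimum fold of (fun i => -scores[i]) over 1..n-1 started at 0 is the
-- first index of the maximum entry among scores[0..n-1]
theorem pv_best (scores : List Int) :
    ∀ n : Nat, 0 < n → n ≤ scores.length →
      ∃ b : Nat,
        (PySem.List.pyRange 1 (n : Int)).foldl
          (fun best x => if -(PySem.List.pyGetD scores x 0) < -(PySem.List.pyGetD scores best 0)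
            then x else best) 0 = (b : Int)
        ∧ b < n ∧ (∀ j, j < n → scores.getD j 0 ≤ scores.getD b 0)
        ∧ (∀ j, j < b → scores.getD j 0 < scores.getD b 0) := by
  intro n
  induction n with
  | zero => intro h; omega
  | succ n ih =>
    intro _ h2
    by_cases hn : n = 0
    · subst hn
      refine ⟨0, ?_, by omega, ?_, by omega⟩
      · rw [show ((0 + 1 : Nat) : Int) = (1 : Int) by norm_num,
          show PySem.List.pyRange 1 (1 : Int) = [] by simp [pysem]]
        rfl
      · intro j hj
        have hj0 : j = 0 := by omega
        exact le_of_eq (by rw [hj0])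
    · obtain ⟨b, hb, hblt, hbmax, hbfirst⟩ := ih (by omega) (by omega)
      rw [show ((n + 1 : Nat) : Int) = (n : Int) + 1 by push_cast; ring,
        PySem.List.pyRange_one_append 1 (n : Int) ((n : Int) + 1) (by omega) (by omega),
        show PySem.List.pyRange (n : Int) ((n : Int) + 1) = [(n : Int)] by
          rw [PySem.List.pyRange_one_cons (by omega)]
          simp [pysem],
        List.foldl_append, hb]
      simp only [List.foldl_cons, List.foldl_nil, PySem.List.pyGetD_natCast]
      by_cases hc : -(scores.getD n 0) < -(scores.getD b 0)
      · rw [if_pos hc]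
        refine ⟨n, rfl, by omega, ?_, ?_⟩
        · intro j hj
          by_cases hjn : j = n
          · rw [hjn]
          · have := hbmax j (by omega)
            omega
        · intro j hj
          have := hbmax j (by omega)
          omega
      · rw [if_neg hc]
        refine ⟨b, rfl, by omega, ?_, hbfirst⟩
        intro j hj
        by_cases hjn : j = n
        · rw [hjn]; omega
        · exact hbmax j (by omega)

-- ===== VERDICT (by name: the statement is the Claim_ definition above) =====
theorem edgeScore_spec : Claim_equal_edgeScore := by
  intro edges _ hpre
  obtain ⟨hne, hrange⟩ := hpre
  unfold Spec_edgeScore edgeScore edgeScore_alt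
  have hfold : ∀ init : List Int,
      (PySem.List.enumerate edges 0).foldl
        (fun sc p => PySem.List.pySetD sc p.2 (PySem.List.pyGetD sc p.2 0 + p.1)) init
        = (PySem.List.enumerate edges 0).foldl pvStepA init := by
    intro init; rfl
  rw [hfold]
  set init : List Int := List.replicate edges.length 0 with hinit
  have hn : 0 < edges.length := List.length_pos_iff.mpr hne
  set scores := (PySem.List.enumerate edges 0).foldl pvStepA init with hsdef
  have hslen : scores.length = edges.length := by
    rw [hsdef, pv_len_fold, hinit, List.length_replicate]
  have hspos : scores ≠ [] := by
    intro h
    rw [h] at hslen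
    simp at hslen
    omega
  set g : Int → Int := fun i => -(PySem.List.pyGetD scores i 0) with hg
  change (match PySem.List.max? scores (fun y => y) with
      | none => (0 : Int)
      | some m => edgeScoreFindA (PySem.List.enumerate scores 0) m)
    = (match PySem.List.pyGet?
          (PySem.List.sorted (PySem.List.pyRange 0 (edges.length : Int)) g) 0 with
      | none => (0 : Int)
      | some x => x)
  -- B's side: the head of the stable sort is the first argmax index b
  obtain ⟨b, hb, hblt', hbmax', hbfirst'⟩ := pv_best scores edges.length hn (by omega)
  have hblt : b < scores.length := by omega
  have hbmax : ∀ j, j < scores.length → scores.getD j 0 ≤ scores.getD b 0 := by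
    intro j hj; exact hbmax' j (by omega)
  have horder : ∃ t' : List Int,
      PySem.List.sorted (PySem.List.pyRange 0 (edges.length : Int)) g = (b : Int) :: t' := by
    rw [PySem.List.sorted_eq_foldl_insertBy,
      PySem.List.pyRange_one_cons (by exact_mod_cast hn), List.foldl_cons,
      show PySem.List.insertBy (fun a b => decide (g a < g b)) 0 [] = [(0 : Int)] from rfl,
      show ((0 : Int) + 1) = (1 : Int) by ring]
    obtain ⟨t', ht'⟩ := pv_foldl_insertBy_head g (PySem.List.pyRange 1 (edges.length : Int)) 0 []
    refine ⟨t', ?_⟩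
    rw [ht']
    exact congrArg (fun z => z :: t') hb
  obtain ⟨t', ht'⟩ := horder
  rw [ht', show PySem.List.pyGet? ((b : Int) :: t') 0 = some ((b : Int)) by
    simp [PySem.List.pyGet?, PySem.List.pyIdx?]]
  -- A's side: max(scores) then the first index scan
  obtain ⟨sb, st, hcons⟩ := List.exists_cons_of_ne_nil hspos
  rw [hcons]
  change (match PySem.List.max? (sb :: st) (fun y => y) with
    | none => (0 : Int)
    | some m => edgeScoreFindA (PySem.List.enumerate (sb :: st) 0) m) = (b : Int)
  rw [PySem.List.max?_id_cons]
  change edgeScoreFindA (PySem.List.enumerate (sb :: st) 0) (st.foldl max sb) = (b : Int)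
  set m : Int := st.foldl max sb with hm
  have hmmem : m ∈ scores := by
    rw [hcons]
    rcases PySem.List.foldl_max_mem st sb with h | h
    · rw [hm, h]; exact List.mem_cons_self
    · exact List.mem_cons_of_mem _ (by rw [hm]; exact h)
  have hmle : ∀ y ∈ scores, y ≤ m := by
    intro y hy
    rw [hcons] at hy
    rcases List.mem_cons.mp hy with h | h
    · rw [h, hm]; exact (PySem.List.le_foldl_max st sb).1
    · rw [hm]; exact (PySem.List.le_foldl_max st sb).2 y h
  rw [← hcons]
  -- scores[b] = m
  have hbm : scores.getD b 0 = m := by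
    have h1 : scores.getD b 0 ≤ m := hmle _ (by
      rw [List.getD_eq_getElem _ _ hblt]; exact List.getElem_mem hblt)
    obtain ⟨k, hk, hkm⟩ := List.mem_iff_getElem.mp hmmem
    have h2 : m ≤ scores.getD b 0 := by
      have := hbmax k hk
      rw [List.getD_eq_getElem _ _ hk, hkm] at this
      exact this
    omega
  have hfind : scores.findIdx (· == m) = b := by
    have hp : ((scores[b]'hblt) == m) = true := by
      have h0 := hbm
      rw [List.getD_eq_getElem _ _ hblt] at h0
      simp [h0]
    have hfst : ∀ j (hj : j < b), ((scores[j]'(by omega)) == m) = false := by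
      intro j hj
      have h1 := hbfirst' j hj
      rw [List.getD_eq_getElem _ _ (by omega), List.getD_eq_getElem _ _ hblt] at h1
      have h2 : scores[b]'hblt = m := by
        rw [← List.getD_eq_getElem _ 0 hblt]; exact hbm
      simp only [beq_eq_false_iff_ne, ne_eq]
      omega
    have h1 : ¬ b < scores.findIdx (· == m) := fun h => by
      have hc := List.not_of_lt_findIdx h
      exact Bool.noConfusion (hp.symm.trans hc)
    have h2 : ¬ scores.findIdx (· == m) < b := fun h => by
      have hl : scores.findIdx (· == m) < scores.length := by omega
      have hx := List.findIdx_getElem (w := hl)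
      have hc := hfst _ h
      exact Bool.noConfusion (hc.symm.trans hx)
    omega
  rw [pv_findA_spec scores 0 m hmmem, hfind]
  simp
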